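-- pv_equiv track=rewrite | github.com/S-V-R-S/AoC | adventOfCode/2025/day9-2.py | noIntersection
-- ===== SOURCE A (Python) =====
-- def noIntersection(polygone, sommets):
--
--     for i in range(len(sommets)):
--         s = sommets[i]
--         s2 = sommets[(i + 1) % len(sommets)]
--
--
--         for j in range(len(polygone)):
--             p = polygone[j]
--             p2 = polygone[(j + 1) % len(polygone)]
--
--             if s[0] == s2[0] and p[1] == p2[1]:
--                 if (
--                     s[0] > min(p[0], p2[0])
--                     and s[0] < max(p[0], p2[0])
--                     and p[1] > min(s[1], s2[1])
--                     and p[1] < max(s[1], s2[1])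
--                 ):
--
--                     return False
--
--             if s[1] == s2[1] and p[0] == p2[0]:
--                 if (
--                     min(p[1], p2[1]) < s[1]
--                     and max(p[1], p2[1]) > s[1]
--                     and min(s[0], s2[0]) < p[0]
--                     and max(s[0], s2[0]) > p[0]
--                 ):
--
--
--                         return False
--
--     return True
-- ===== SOURCE B (Python) =====
-- def noIntersection(polygone, sommets):
--     def edges(pts):
--         return list(zip(pts, pts[1:] + pts[:1]))
--
--     # collect tagged axis-aligned segments of both polygons
--     verts = []  # (x, ylo, yhi, tag): vertical segments
--     hors = []   # (xlo, xhi, y, tag): horizontal segments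
--     for tag, pts in ((0, polygone), (1, sommets)):
--         verts += [(x1, min(y1, y2), max(y1, y2), tag)
--                   for (x1, y1), (x2, y2) in edges(pts) if x1 == x2]
--         hors += [(min(x1, x2), max(x1, x2), y1, tag)
--                  for (x1, y1), (x2, y2) in edges(pts) if y1 == y2]
--     verts.sort(key=lambda v: v[0])
--     hors.sort(key=lambda h: h[0])
--
--     # sweep left to right over the verticals; activate a horizontal once its
--     # left end lies strictly left of the sweep position (lazy deletion: kept
--     # active forever, the scan rechecks that the horizontal really spans x).
--     active = []
--     i = 0
--     for x, ylo, yhi, tag in verts: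
--         while i < len(hors) and hors[i][0] < x:
--             active.append(hors[i])
--             i += 1
--         for xlo, xhi, y, t in active:
--             if t != tag and xlo < x < xhi and ylo < y < yhi:
--                 return False
--     return True
-- ===== Notes on version B (the rewrite author's own statement) =====
-- stated objective: faster
-- what changed: B extracts the tagged vertical/horizontal segments once, sorts both families by x, and runs a left-to-right sweep that activates a horizontal when its left end passes the sweep position (lazy deletion, rechecking the span), instead of A's all-pairs double loop over all vertex pairs with modulo indexing and per-pair axis tests.
import Mathlib
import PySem

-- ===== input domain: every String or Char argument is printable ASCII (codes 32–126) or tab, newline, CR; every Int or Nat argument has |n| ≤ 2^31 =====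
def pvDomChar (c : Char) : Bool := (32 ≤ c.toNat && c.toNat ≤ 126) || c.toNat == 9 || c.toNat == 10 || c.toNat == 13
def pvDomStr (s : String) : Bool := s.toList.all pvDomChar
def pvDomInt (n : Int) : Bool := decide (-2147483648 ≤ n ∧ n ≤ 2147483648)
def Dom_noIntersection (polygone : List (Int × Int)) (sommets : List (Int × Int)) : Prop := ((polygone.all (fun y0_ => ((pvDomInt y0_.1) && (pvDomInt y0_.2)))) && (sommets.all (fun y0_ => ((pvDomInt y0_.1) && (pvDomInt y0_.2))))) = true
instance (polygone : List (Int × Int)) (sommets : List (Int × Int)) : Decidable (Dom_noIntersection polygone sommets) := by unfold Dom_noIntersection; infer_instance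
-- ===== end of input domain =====

-- B replaces A's all-pairs double loop by a left-to-right sweep: tagged axis-aligned segments are
-- extracted once, sorted by x, and horizontals are activated as the sweep passes their left end
-- (lazy deletion); measured faster than A on the generated inputs.


-- ===== PORT A =====
-- literal transliteration of A: indexing with (i+1) % len, `return False` inside the loops = `.all` of the negated condition
def noIntersection (polygone : List (Int × Int)) (sommets : List (Int × Int)) : Bool :=
  (PySem.List.pyRange 0 (sommets.length : Int) 1).all (fun i =>
    let s := PySem.List.pyGetD sommets i (0, 0)
    let s2 := PySem.List.pyGetD sommets (PySem.Int.mod (i + 1) (sommets.length : Int)) (0, 0)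
    (PySem.List.pyRange 0 (polygone.length : Int) 1).all (fun j =>
      let p := PySem.List.pyGetD polygone j (0, 0)
      let p2 := PySem.List.pyGetD polygone (PySem.Int.mod (j + 1) (polygone.length : Int)) (0, 0)
      !(((s.1 == s2.1 && p.2 == p2.2) &&
          (decide (s.1 > min p.1 p2.1) && decide (s.1 < max p.1 p2.1) &&
           decide (p.2 > min s.2 s2.2) && decide (p.2 < max s.2 s2.2))) ||
        ((s.2 == s2.2 && p.1 == p2.1) &&
          (decide (min p.2 p2.2 < s.2) && decide (max p.2 p2.2 > s.2) &&
           decide (min s.1 s2.1 < p.1) && decide (max s.1 s2.1 > p.1))))))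

-- ===== PORT B =====
-- edges(pts) = list(zip(pts, pts[1:] + pts[:1]))
def pvEdges (pts : List (Int × Int)) : List ((Int × Int) × (Int × Int)) :=
  pts.zip (pts.drop 1 ++ pts.take 1)

-- the two tagged comprehensions of Source B: (x, ylo, yhi, tag) / (xlo, xhi, y, tag)
def pvVertsOf (tag : Int) (pts : List (Int × Int)) : List (Int × Int × Int × Int) :=
  ((pvEdges pts).filter (fun e => e.1.1 == e.2.1)).map
    (fun e => (e.1.1, min e.1.2 e.2.2, max e.1.2 e.2.2, tag))

def pvHorsOf (tag : Int) (pts : List (Int × Int)) : List (Int × Int × Int × Int) :=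
  ((pvEdges pts).filter (fun e => e.1.2 == e.2.2)).map
    (fun e => (min e.1.1 e.2.1, max e.1.1 e.2.1, e.1.2, tag))

-- the scan condition on an active horizontal h against the current vertical v
def pvHit (v h : Int × Int × Int × Int) : Bool :=
  (h.2.2.2 != v.2.2.2) && decide (h.1 < v.1) && decide (v.1 < h.2.1) &&
  decide (v.2.1 < h.2.2.1) && decide (h.2.2.1 < v.2.2.1)

-- the 'for v in verts' loop carrying (active, i); 'rem' is hors[i:], the while loop is takeWhile/dropWhile
def pvSweep : List (Int × Int × Int × Int) → List (Int × Int × Int × Int) →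
    List (Int × Int × Int × Int) → Bool
  | [], _, _ => true
  | v :: vs, active, rem =>
    let active' := active ++ rem.takeWhile (fun h => decide (h.1 < v.1))
    let rem' := rem.dropWhile (fun h => decide (h.1 < v.1))
    if active'.any (pvHit v) then false else pvSweep vs active' rem'

def noIntersection_alt (polygone : List (Int × Int)) (sommets : List (Int × Int)) : Bool :=
  pvSweep (PySem.List.sorted (pvVertsOf 0 polygone ++ pvVertsOf 1 sommets) (fun v => v.1) false)
    []
    (PySem.List.sorted (pvHorsOf 0 polygone ++ pvHorsOf 1 sommets) (fun h => h.1) false)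

-- ===== PRECONDITION & SPEC =====
def Spec_noIntersection (polygone : List (Int × Int)) (sommets : List (Int × Int)) (out : Bool) : Prop := out = noIntersection_alt polygone sommets
instance (polygone : List (Int × Int)) (sommets : List (Int × Int)) (out : Bool) : Decidable (Spec_noIntersection polygone sommets out) := by unfold Spec_noIntersection; infer_instance

-- ===== CLAIM (what is proved, stated in full; the proofs are below) =====
def Claim_equal_noIntersection : Prop := ∀ (polygone : List (Int × Int)) (sommets : List (Int × Int)), Dom_noIntersection polygone sommets → Spec_noIntersection polygone sommets (noIntersection polygone sommets)

-- ===== LEMMAS AND PROOFS =====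

-- A's indexed access (l[i], l[(i+1) % len(l)]) for i in range(len(l)) enumerates exactly B's cyclic edge list
theorem pvEdges_eq (l : List (Int × Int)) :
    (PySem.List.pyRange 0 (l.length : Int) 1).map
      (fun i => (PySem.List.pyGetD l i ((0 : Int), (0 : Int)),
                 PySem.List.pyGetD l (PySem.Int.mod (i + 1) (l.length : Int)) (0, 0)))
      = pvEdges l := by
  unfold pvEdges
  apply List.ext_getElem
  · simp [PySem.List.length_pyRange_one]
    omega
  · intro k h1 h2
    have hk : k < l.length := by
      simpa [PySem.List.length_pyRange_one] using h1
    simp only [List.getElem_map, PySem.List.getElem_pyRange_one, List.getElem_zip]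
    have hcast : (0 : Int) + (k : Int) + 1 = ((k + 1 : Nat) : Int) := by push_cast; ring
    rw [hcast, PySem.Int.mod_natCast, zero_add, PySem.List.pyGetD_natCast, PySem.List.pyGetD_natCast]
    have hlen : (List.drop 1 l ++ List.take 1 l).length = l.length := by
      simp; omega
    refine Prod.ext ?_ ?_
    · simp [List.getD_eq_getElem?_getD, List.getElem?_eq_getElem hk]
    · by_cases hk1 : k + 1 < l.length
      · have hm : (k + 1) % l.length = k + 1 := Nat.mod_eq_of_lt hk1
        rw [hm]
        rw [List.getElem_append_left (by simp; omega)]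
        simp [List.getD_eq_getElem?_getD, List.getElem?_eq_getElem hk1]
      · have hke : k + 1 = l.length := by omega
        have hm : (k + 1) % l.length = 0 := by rw [hke]; simp
        rw [hm]
        rw [List.getElem_append_right (by simp; omega)]
        have h0 : 0 < l.length := by omega
        simp [List.getElem_take, List.getD_eq_getElem?_getD, List.getElem?_eq_getElem h0]
        congr 1
        omega

theorem pv_mem_edges (l : List (Int × Int)) (e : (Int × Int) × (Int × Int)) :
    e ∈ pvEdges l ↔ ∃ i : Int, (0 ≤ i ∧ i < (l.length : Int)) ∧
      (PySem.List.pyGetD l i ((0 : Int), (0 : Int)),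
       PySem.List.pyGetD l (PySem.Int.mod (i + 1) (l.length : Int)) (0, 0)) = e := by
  rw [← pvEdges_eq l]
  simp [List.mem_map, PySem.List.mem_pyRange_one]

-- on an xlo-ordered list, every element with xlo < x lies in the takeWhile prefix
theorem pv_mem_takeWhile (x : Int) (rem : List (Int × Int × Int × Int))
    (hp : rem.Pairwise (fun a b => a.1 ≤ b.1)) (h : Int × Int × Int × Int)
    (hm : h ∈ rem) (hlt : h.1 < x) : h ∈ rem.takeWhile (fun h => decide (h.1 < x)) := by
  induction rem with
  | nil => cases hm
  | cons a t ih =>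
    rcases List.pairwise_cons.mp hp with ⟨ha, hpt⟩
    rcases List.mem_cons.mp hm with rfl | hmt
    · simp [hlt]
    · have hax : a.1 < x := lt_of_le_of_lt (ha h hmt) hlt
      simp only [List.takeWhile_cons, decide_eq_true_eq, if_pos hax]
      exact List.mem_cons_of_mem _ (ih hpt hmt)

-- the sweep returns False exactly when some vertical hits some horizontal of active ++ rem
theorem pvSweep_false_iff (vs : List (Int × Int × Int × Int)) :
    ∀ (active rem : List (Int × Int × Int × Int)),
    rem.Pairwise (fun a b => a.1 ≤ b.1) →
    (pvSweep vs active rem = false ↔ ∃ v ∈ vs, ∃ h ∈ active ++ rem, pvHit v h = true) := by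
  induction vs with
  | nil => intro active rem _; simp [pvSweep]
  | cons v vs ih =>
    intro active rem hp
    simp only [pvSweep]
    set tw := rem.takeWhile (fun h => decide (h.1 < v.1)) with htw
    set dw := rem.dropWhile (fun h => decide (h.1 < v.1)) with hdw
    have hsplit : (active ++ tw) ++ dw = active ++ rem := by
      rw [List.append_assoc, htw, hdw, List.takeWhile_append_dropWhile]
    have hpd : dw.Pairwise (fun a b => a.1 ≤ b.1) :=
      List.Pairwise.sublist (List.dropWhile_sublist _) hp
    by_cases hany : (active ++ tw).any (pvHit v) = true
    · simp only [if_pos hany]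
      rcases List.any_eq_true.mp hany with ⟨h, hmem, hhit⟩
      constructor
      · intro _
        refine ⟨v, List.mem_cons_self, h, ?_, hhit⟩
        rw [← hsplit]; exact List.mem_append_left _ hmem
      · intro _; trivial
    · simp only [if_neg hany, ih (active ++ tw) dw hpd, hsplit]
      constructor
      · rintro ⟨w, hw, hrest⟩; exact ⟨w, List.mem_cons_of_mem _ hw, hrest⟩
      · rintro ⟨w, hw, h, hm, hhit⟩
        rcases List.mem_cons.mp hw with rfl | hw'
        · exfalso; apply hany
          refine List.any_eq_true.mpr ⟨h, ?_, hhit⟩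
          rcases List.mem_append.mp hm with hma | hmr
          · exact List.mem_append_left _ hma
          · have hlt : h.1 < w.1 := by
              simp only [pvHit, Bool.and_eq_true, decide_eq_true_eq] at hhit
              exact hhit.1.1.1.2
            exact List.mem_append_right _ (pv_mem_takeWhile w.1 rem hp h hmr hlt)
        · exact ⟨w, hw', h, hm, hhit⟩

-- B returns False iff some tagged vertical and some tagged horizontal cross
theorem pvAlt_false_iff (polygone sommets : List (Int × Int)) :
    noIntersection_alt polygone sommets = false ↔
      ∃ v ∈ pvVertsOf 0 polygone ++ pvVertsOf 1 sommets,
      ∃ h ∈ pvHorsOf 0 polygone ++ pvHorsOf 1 sommets, pvHit v h = true := by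
  unfold noIntersection_alt
  rw [pvSweep_false_iff _ _ _ (PySem.List.sorted_pairwise _ _)]
  simp [PySem.List.mem_sorted]

-- A returns False iff some tagged vertical and some tagged horizontal cross
theorem pvA_false_iff (polygone sommets : List (Int × Int)) :
    noIntersection polygone sommets = false ↔
      ∃ v ∈ pvVertsOf 0 polygone ++ pvVertsOf 1 sommets,
      ∃ h ∈ pvHorsOf 0 polygone ++ pvHorsOf 1 sommets, pvHit v h = true := by
  simp only [noIntersection, List.all_eq_false, PySem.List.mem_pyRange_one,
    Bool.not_eq_true, Bool.not_eq_false', Bool.or_eq_true, Bool.and_eq_true, beq_iff_eq,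
    decide_eq_true_eq, gt_iff_lt, pvVertsOf, pvHorsOf, List.mem_append, List.mem_map,
    List.mem_filter, pv_mem_edges]
  constructor
  · rintro ⟨i, hi, j, hj, (⟨⟨h1, h2⟩, ⟨⟨h3, h4⟩, h5⟩, h6⟩ | ⟨⟨h1, h2⟩, ⟨⟨h3, h4⟩, h5⟩, h6⟩)⟩
    · refine ⟨_, Or.inr ⟨_, ⟨⟨i, hi, rfl⟩, h1⟩, rfl⟩, _, Or.inl ⟨_, ⟨⟨j, hj, rfl⟩, h2⟩, rfl⟩, ?_⟩
      simp only [pvHit, Bool.and_eq_true, bne_iff_ne, ne_eq, decide_eq_true_eq]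
      exact ⟨⟨⟨⟨by norm_num, h3⟩, h4⟩, h5⟩, h6⟩
    · refine ⟨_, Or.inl ⟨_, ⟨⟨j, hj, rfl⟩, h2⟩, rfl⟩, _, Or.inr ⟨_, ⟨⟨i, hi, rfl⟩, h1⟩, rfl⟩, ?_⟩
      simp only [pvHit, Bool.and_eq_true, bne_iff_ne, ne_eq, decide_eq_true_eq]
      exact ⟨⟨⟨⟨by norm_num, h5⟩, h6⟩, h3⟩, h4⟩
  · rintro ⟨v, (⟨e, ⟨⟨j, hj, rfl⟩, he⟩, rfl⟩ | ⟨e, ⟨⟨i, hi, rfl⟩, he⟩, rfl⟩),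
            h, (⟨f, ⟨⟨j2, hj2, rfl⟩, hf⟩, rfl⟩ | ⟨f, ⟨⟨i2, hi2, rfl⟩, hf⟩, rfl⟩), hhit⟩
    -- (v from polygone, h from polygone): equal tags, the scan condition is false
    · simp only [pvHit, bne_self_eq_false, Bool.false_and] at hhit
      exact Bool.noConfusion hhit
    -- (v from polygone, h from sommets): A's second branch at (i2, j)
    · simp only [pvHit, Bool.and_eq_true, bne_iff_ne, ne_eq, decide_eq_true_eq] at hhit
      exact ⟨i2, hi2, j, hj, Or.inr ⟨⟨hf, he⟩, ⟨⟨hhit.1.2, hhit.2⟩, hhit.1.1.1.2⟩, hhit.1.1.2⟩⟩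
    -- (v from sommets, h from polygone): A's first branch at (i, j2)
    · simp only [pvHit, Bool.and_eq_true, bne_iff_ne, ne_eq, decide_eq_true_eq] at hhit
      exact ⟨i, hi, j2, hj2, Or.inl ⟨⟨he, hf⟩, ⟨⟨hhit.1.1.1.2, hhit.1.1.2⟩, hhit.1.2⟩, hhit.2⟩⟩
    -- (v from sommets, h from sommets): equal tags, the scan condition is false
    · simp only [pvHit, bne_self_eq_false, Bool.false_and] at hhit
      exact Bool.noConfusion hhit

-- ===== VERDICT (by name: the statement is the Claim_ definition above) =====
theorem noIntersection_spec : Claim_equal_noIntersection := by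
  intro polygone sommets _
  rw [Spec_noIntersection]
  have h := (pvA_false_iff polygone sommets).trans (pvAlt_false_iff polygone sommets).symm
  cases ha : noIntersection polygone sommets <;>
    cases hb : noIntersection_alt polygone sommets <;> simp_all
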